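-- pv_equiv track=rewrite | github.com/rebe270/multiplosConpromedio | multiplos.py | multiplos_cuatro_cifras
-- ===== SOURCE A (Python) =====
-- def multiplos_cuatro_cifras(dia):
--     # Encontrar los primeros tres múltiplos de 4 cifras del día
--     multiplos = []
--     num = 1000  # Inicia con el primer número de 4 cifras
--     while len(multiplos) < 3:
--         if num % dia == 0:
--             multiplos.append(num)
--         num += 1
--     return multiplos
-- ===== SOURCE B (Python) =====
-- def multiplos_cuatro_cifras(dia):
--     # First 4-digit multiple via ceiling division, then two more steps of |dia|
--     d = abs(dia)
--     m = ((1000 + d - 1) // d) * d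
--     return [m, m + d, m + 2 * d]
-- ===== Notes on version B (the rewrite author's own statement) =====
-- stated objective: faster
-- what changed: Replaced the linear scan from 1000 with a closed-form ceiling-division computation of the first 4-digit multiple, adding |dia| twice for the next two.
import Mathlib
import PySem

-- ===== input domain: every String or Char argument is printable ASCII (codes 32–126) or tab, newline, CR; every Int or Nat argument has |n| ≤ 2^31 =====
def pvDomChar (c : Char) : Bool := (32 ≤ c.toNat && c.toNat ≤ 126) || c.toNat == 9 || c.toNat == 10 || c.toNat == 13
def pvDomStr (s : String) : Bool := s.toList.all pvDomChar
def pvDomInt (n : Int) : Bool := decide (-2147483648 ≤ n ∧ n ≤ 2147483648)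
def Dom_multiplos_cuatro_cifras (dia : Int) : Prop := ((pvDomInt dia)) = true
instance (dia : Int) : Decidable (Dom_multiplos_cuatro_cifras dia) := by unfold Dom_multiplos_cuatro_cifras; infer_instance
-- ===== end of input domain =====

-- B replaces A's linear scan from 1000 with a closed-form ceiling-division computation (O(1) vs O(|dia|)).

-- ===== PORT A =====
-- the while loop, with a fuel bound large enough for every dia ≠ 0 (3*|dia| steps suffice)
def pvLoopA (dia : Int) (fuel : Nat) (multiplos : List Int) (num : Int) : List Int :=
  match fuel with
  | 0 => multiplos
  | Nat.succ f =>
    if multiplos.length < 3 then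
      if PySem.Int.mod num dia == 0 then pvLoopA dia f (multiplos ++ [num]) (num + 1)
      else pvLoopA dia f multiplos (num + 1)
    else multiplos

def multiplos_cuatro_cifras (dia : Int) : List Int :=
  pvLoopA dia (3 * dia.natAbs + 3) [] 1000

-- ===== PORT B =====
def multiplos_cuatro_cifras_alt (dia : Int) : List Int :=
  let d : Int := |dia|
  let m : Int := PySem.Int.floordiv (1000 + d - 1) d * d
  [m, m + d, m + 2 * d]

-- ===== PRECONDITION & SPEC =====
-- Pre_ excludes exactly dia = 0, on which Python A raises ZeroDivisionError (and B raises too).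
def Pre_multiplos_cuatro_cifras (dia : Int) : Prop := dia ≠ 0
instance (dia : Int) : Decidable (Pre_multiplos_cuatro_cifras dia) := by unfold Pre_multiplos_cuatro_cifras; infer_instance
def pvWitness_multiplos_cuatro_cifras : Int := 7

def Spec_multiplos_cuatro_cifras (dia : Int) (out : List Int) : Prop := out = multiplos_cuatro_cifras_alt dia
instance (dia : Int) (out : List Int) : Decidable (Spec_multiplos_cuatro_cifras dia out) := by unfold Spec_multiplos_cuatro_cifras; infer_instance

-- ===== CLAIM (what is proved, stated in full; the proofs are below) =====
def Claim_equal_multiplos_cuatro_cifras : Prop := ∀ (dia : Int), Dom_multiplos_cuatro_cifras dia → Pre_multiplos_cuatro_cifras dia → Spec_multiplos_cuatro_cifras dia (multiplos_cuatro_cifras dia)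

-- ===== LEMMAS AND PROOFS =====

-- the next multiple of dia that is ≥ num
def pvNm (dia num : Int) : Int := num + (-num) % |dia|

-- the list [nm num, nm num + d, …] of the next k multiples starting at num
def pvChain (dia : Int) : Int → Nat → List Int
  | _, 0 => []
  | num, Nat.succ k => pvNm dia num :: pvChain dia (pvNm dia num + 1) k

lemma pvNm_dvd (dia num : Int) (_h : dia ≠ 0) : dia ∣ pvNm dia num := by
  rw [← abs_dvd]
  refine ⟨-((-num) / |dia|), ?_⟩
  unfold pvNm
  rw [Int.emod_def]
  ring

lemma pvNm_ge (dia num : Int) (h : dia ≠ 0) : num ≤ pvNm dia num := by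
  have := Int.emod_nonneg (-num) (by simpa using h : (|dia| : Int) ≠ 0)
  unfold pvNm; omega

lemma pvNm_lt (dia num : Int) (h : dia ≠ 0) : pvNm dia num < num + |dia| := by
  have := Int.emod_lt_of_pos (-num) (by positivity : (0:Int) < |dia|)
  unfold pvNm; omega

lemma pvNm_unique (dia num m : Int) (h : dia ≠ 0) (hdvd : dia ∣ m)
    (h1 : num ≤ m) (h2 : m < num + |dia|) : pvNm dia num = m := by
  have hd1 : dia ∣ (m - pvNm dia num) := (hdvd).sub (pvNm_dvd dia num h)
  have hd2 : |dia| ∣ (m - pvNm dia num) := (abs_dvd _ _).mpr hd1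
  have hge := pvNm_ge dia num h
  have hlt := pvNm_lt dia num h
  have : m - pvNm dia num = 0 := by
    apply Int.eq_zero_of_abs_lt_dvd hd2
    rw [abs_lt]; omega
  omega

lemma pvNm_eq_self (dia num : Int) (h : dia ≠ 0) (hdvd : dia ∣ num) :
    pvNm dia num = num := by
  apply pvNm_unique dia num num h hdvd le_rfl
  have : (0:Int) < |dia| := by positivity
  omega

lemma pvNm_succ_of_dvd (dia num : Int) (h : dia ≠ 0) (hdvd : dia ∣ num) :
    pvNm dia (num + 1) = num + |dia| := by
  apply pvNm_unique dia (num + 1) (num + |dia|) h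
  · exact hdvd.add ((dvd_abs dia dia).mpr dvd_rfl)
  · have : (0:Int) < |dia| := by positivity
    omega
  · omega

lemma pvNm_succ_of_not_dvd (dia num : Int) (h : dia ≠ 0) (hdvd : ¬ dia ∣ num) :
    pvNm dia (num + 1) = pvNm dia num := by
  apply pvNm_unique dia (num + 1) (pvNm dia num) h (pvNm_dvd dia num h)
  · have hge := pvNm_ge dia num h
    have hne : pvNm dia num ≠ num := fun he => hdvd (he ▸ pvNm_dvd dia num h)
    omega
  · have := pvNm_lt dia num h
    omega

lemma pvLoopA_full (dia : Int) (fuel : Nat) (acc : List Int) (num : Int)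
    (h : ¬ acc.length < 3) : pvLoopA dia fuel acc num = acc := by
  cases fuel with
  | zero => rfl
  | succ f => simp [pvLoopA, h]

lemma pvLoopA_run (dia : Int) (hd : dia ≠ 0) :
    ∀ (fuel : Nat) (k : Nat) (num : Int) (acc : List Int),
      acc.length + k = 3 → 1 ≤ k →
      pvNm dia num + ((k : Int) - 1) * |dia| + 1 - num ≤ (fuel : Int) →
      pvLoopA dia fuel acc num = acc ++ pvChain dia num k := by
  intro fuel
  induction fuel with
  | zero =>
    intro k num acc hlen hk hfuel
    exfalso
    have hge := pvNm_ge dia num hd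
    have hdpos : (0:Int) < |dia| := by positivity
    have : (0:Int) ≤ ((k : Int) - 1) * |dia| := by
      apply mul_nonneg _ (le_of_lt hdpos); omega
    omega
  | succ f ih =>
    intro k num acc hlen hk hfuel
    have hlt : acc.length < 3 := by omega
    obtain ⟨k', rfl⟩ : ∃ k', k = k' + 1 := ⟨k - 1, by omega⟩
    by_cases hdvd : dia ∣ num
    · have hmod : (PySem.Int.mod num dia == 0) = true := by
        rw [beq_iff_eq]; exact (PySem.Int.mod_eq_zero_iff_dvd _ _).mpr hdvd
      have hnm := pvNm_eq_self dia num hd hdvd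
      rw [pvLoopA, if_pos hlt, hmod, if_pos rfl]
      rcases Nat.eq_zero_or_pos k' with hk0 | hk1
      · subst hk0
        rw [pvLoopA_full dia f _ _ (by simp; omega)]
        simp [pvChain, hnm]
      · rw [ih k' (num + 1) (acc ++ [num]) (by simp; omega) hk1 ?_]
        · simp only [pvChain, hnm, List.append_assoc, List.singleton_append]
        · have hnm1 := pvNm_succ_of_dvd dia num hd hdvd
          have : ((k' : Int) - 1) * |dia| + |dia| = ((k' : Int) + 1 - 1) * |dia| := by ring
          rw [hnm1]
          push_cast at hfuel ⊢
          omega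
    · have hmod : (PySem.Int.mod num dia == 0) = false := by
        rw [beq_eq_false_iff_ne]
        intro he; exact hdvd ((PySem.Int.mod_eq_zero_iff_dvd _ _).mp he)
      rw [pvLoopA, if_pos hlt, hmod]
      simp only [Bool.false_eq_true, if_false]
      rw [ih (k' + 1) (num + 1) acc hlen hk ?_]
      · have hnm1 := pvNm_succ_of_not_dvd dia num hd hdvd
        simp only [pvChain, hnm1]
      · rw [pvNm_succ_of_not_dvd dia num hd hdvd]
        push_cast at hfuel ⊢
        omega

lemma pvAlt_eq (dia : Int) (hd : dia ≠ 0) :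
    multiplos_cuatro_cifras_alt dia =
      [pvNm dia 1000, pvNm dia 1000 + |dia|, pvNm dia 1000 + 2 * |dia|] := by
  have hdpos : (0:Int) < |dia| := by positivity
  have hm : PySem.Int.floordiv (1000 + |dia| - 1) |dia| * |dia| = pvNm dia 1000 := by
    rw [PySem.Int.floordiv_eq_ediv_of_pos hdpos]
    set q : Int := (1000 + |dia| - 1) / |dia| with hq
    have hdm := Int.ediv_add_emod (1000 + |dia| - 1) |dia|
    rw [← hq] at hdm
    have hr0 := Int.emod_nonneg (1000 + |dia| - 1) (by omega : (|dia|:Int) ≠ 0)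
    have hr1 := Int.emod_lt_of_pos (1000 + |dia| - 1) hdpos
    symm
    apply pvNm_unique dia 1000 (q * |dia|) hd
    · exact (abs_dvd _ _).mp (dvd_mul_left |dia| q)
    · have hc : |dia| * q = q * |dia| := mul_comm _ _
      omega
    · have hc : |dia| * q = q * |dia| := mul_comm _ _
      omega
  simp only [multiplos_cuatro_cifras_alt]
  rw [hm]

-- ===== VERDICT (by name: the statement is the Claim_ definition above) =====
theorem multiplos_cuatro_cifras_spec : Claim_equal_multiplos_cuatro_cifras := by
  intro dia _ hpre
  have hd : dia ≠ 0 := hpre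
  unfold Spec_multiplos_cuatro_cifras multiplos_cuatro_cifras
  have hdpos : (0:Int) < |dia| := by positivity
  have habs : ((dia.natAbs : Int)) = |dia| := Int.abs_eq_natAbs dia ▸ rfl
  have hfuel : pvNm dia 1000 + ((3 : Int) - 1) * |dia| + 1 - 1000 ≤ ((3 * dia.natAbs + 3 : Nat) : Int) := by
    have := pvNm_lt dia 1000 hd
    push_cast
    omega
  rw [pvLoopA_run dia hd (3 * dia.natAbs + 3) 3 1000 [] (by simp) (by omega) hfuel]
  rw [pvAlt_eq dia hd]
  have h1 : pvNm dia (pvNm dia 1000 + 1) = pvNm dia 1000 + |dia| :=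
    pvNm_succ_of_dvd dia (pvNm dia 1000) hd (pvNm_dvd dia 1000 hd)
  have h2 : pvNm dia (pvNm dia 1000 + |dia| + 1) = pvNm dia 1000 + 2 * |dia| := by
    have : dia ∣ pvNm dia 1000 + |dia| :=
      (pvNm_dvd dia 1000 hd).add ((dvd_abs dia dia).mpr dvd_rfl)
    have h := pvNm_succ_of_dvd dia (pvNm dia 1000 + |dia|) hd this
    rw [h]; ring
  simp only [pvChain, h1, h2, List.nil_append]
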